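-- pv_equiv track=rewrite | github.com/maxbaydi/ai-part-generator | bridge/app.py | fit_pitch_to_range
-- ===== SOURCE A (Python) =====
-- from typing import Any, Dict, List, Optional, Tuple
--
-- def clamp(value: float, low: float, high: float) -> float:
--     return max(low, min(high, value))
--
-- def fit_pitch_to_range(pitch: int, abs_range: Optional[Tuple[int, int]], policy: str) -> int:
--     if not abs_range:
--         return pitch
--     low, high = abs_range
--     if low <= pitch <= high:
--         return pitch
--     if policy == "octave_shift_to_fit":
--         shifted = pitch
--         if shifted < low:
--             while shifted < low:
--                 shifted += 12
--         elif shifted > high: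
--             while shifted > high:
--                 shifted -= 12
--         if low <= shifted <= high:
--             return shifted
--     return int(clamp(pitch, low, high))
-- ===== SOURCE B (Python) =====
-- def fit_pitch_to_range(pitch, abs_range, policy):
--     if not abs_range:
--         return pitch
--     low, high = abs_range
--     if low <= pitch <= high:
--         return pitch
--     if policy == "octave_shift_to_fit":
--         if pitch < low:
--             shifted = pitch + 12 * ((low - pitch + 11) // 12)
--         else:
--             shifted = pitch - 12 * ((pitch - high + 11) // 12)
--         if low <= shifted <= high:
--             return shifted
--     return max(low, min(high, pitch))
-- ===== Notes on version B (the rewrite author's own statement) =====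
-- stated objective: idiomatic
-- what changed: The two step-by-12 while-loops are replaced by closed-form ceiling-division arithmetic computing the shifted pitch in O(1), and int(clamp(...)) by a direct max/min.
import Mathlib
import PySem

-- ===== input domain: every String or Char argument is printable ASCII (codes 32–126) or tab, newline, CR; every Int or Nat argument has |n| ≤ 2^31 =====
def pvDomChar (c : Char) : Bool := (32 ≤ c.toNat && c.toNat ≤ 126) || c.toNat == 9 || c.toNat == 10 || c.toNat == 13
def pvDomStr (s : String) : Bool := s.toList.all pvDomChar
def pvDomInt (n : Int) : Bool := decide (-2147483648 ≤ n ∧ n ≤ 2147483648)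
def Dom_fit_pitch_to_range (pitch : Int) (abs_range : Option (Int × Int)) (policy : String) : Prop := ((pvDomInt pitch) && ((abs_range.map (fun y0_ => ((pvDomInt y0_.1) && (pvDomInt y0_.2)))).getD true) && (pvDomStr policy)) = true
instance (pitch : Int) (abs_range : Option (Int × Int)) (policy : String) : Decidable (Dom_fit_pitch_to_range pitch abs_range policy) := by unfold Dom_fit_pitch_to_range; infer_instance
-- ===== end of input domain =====

-- B replaces the two step-by-12 while-loops with closed-form ceiling-division arithmetic (objective: idiomatic/simpler).
-- ===== PORT A =====
-- while shifted < low: shifted += 12   (structural fuel recursion; (low - shifted).toNat steps always suffice)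
def pvShiftUpFuel : Nat → Int → Int → Int
  | 0, _, s => s
  | n + 1, low, s => if s < low then pvShiftUpFuel n low (s + 12) else s

def pvShiftUp (low : Int) (shifted : Int) : Int :=
  pvShiftUpFuel (low - shifted).toNat low shifted

-- while shifted > high: shifted -= 12
def pvShiftDownFuel : Nat → Int → Int → Int
  | 0, _, s => s
  | n + 1, high, s => if s > high then pvShiftDownFuel n high (s - 12) else s

def pvShiftDown (high : Int) (shifted : Int) : Int :=
  pvShiftDownFuel (shifted - high).toNat high shifted

-- clamp(value, low, high) = max(low, min(high, value)); int() on an int value is the identity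
def pvClamp (value low high : Int) : Int := max low (min high value)

def fit_pitch_to_range (pitch : Int) (abs_range : Option (Int × Int)) (policy : String) : Int :=
  match abs_range with
  | none => pitch
  | some (low, high) =>
    if low ≤ pitch ∧ pitch ≤ high then pitch
    else
      let res : Option Int :=
        if policy = "octave_shift_to_fit" then
          let shifted := pitch
          let shifted :=
            if shifted < low then pvShiftUp low shifted
            else if shifted > high then pvShiftDown high shifted
            else shifted
          if low ≤ shifted ∧ shifted ≤ high then some shifted else none
        else none
      match res with
      | some v => v
      | none => pvClamp pitch low high

-- ===== PORT B =====
def fit_pitch_to_range_alt (pitch : Int) (abs_range : Option (Int × Int)) (policy : String) : Int :=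
  match abs_range with
  | none => pitch
  | some (low, high) =>
    if low ≤ pitch ∧ pitch ≤ high then pitch
    else
      let res : Option Int :=
        if policy = "octave_shift_to_fit" then
          let shifted :=
            if pitch < low then pitch + 12 * (PySem.Int.floordiv (low - pitch + 11) 12)
            else pitch - 12 * (PySem.Int.floordiv (pitch - high + 11) 12)
          if low ≤ shifted ∧ shifted ≤ high then some shifted else none
        else none
      match res with
      | some v => v
      | none => max low (min high pitch)

-- ===== PRECONDITION & SPEC =====
def Spec_fit_pitch_to_range (pitch : Int) (abs_range : Option (Int × Int)) (policy : String) (out : Int) : Prop := out = fit_pitch_to_range_alt pitch abs_range policy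
instance (pitch : Int) (abs_range : Option (Int × Int)) (policy : String) (out : Int) : Decidable (Spec_fit_pitch_to_range pitch abs_range policy out) := by unfold Spec_fit_pitch_to_range; infer_instance

-- ===== CLAIM (what is proved, stated in full; the proofs are below) =====
def Claim_equal_fit_pitch_to_range : Prop := ∀ (pitch : Int) (abs_range : Option (Int × Int)) (policy : String), Dom_fit_pitch_to_range pitch abs_range policy → Spec_fit_pitch_to_range pitch abs_range policy (fit_pitch_to_range pitch abs_range policy)

-- ===== LEMMAS AND PROOFS =====

-- pvShiftUp is the smallest value ≥ low congruent to s mod 12, as a ceiling division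
theorem pvShiftUpFuel_closed (n : Nat) (low s : Int) (h : s < low)
    (hn : (low - s).toNat ≤ n) :
    pvShiftUpFuel n low s = s + 12 * ((low - s + 11) / 12) := by
  induction n generalizing s with
  | zero => omega
  | succ n ih =>
    rw [pvShiftUpFuel, if_pos h]
    by_cases h2 : s + 12 < low
    · rw [ih (s + 12) h2 (by omega)]
      omega
    · have he : pvShiftUpFuel n low (s + 12) = s + 12 := by
        cases n <;> simp [pvShiftUpFuel, h2]
      rw [he]; omega

theorem pvShiftUp_closed (low s : Int) (h : s < low) :
    pvShiftUp low s = s + 12 * (PySem.Int.floordiv (low - s + 11) 12) := by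
  rw [PySem.Int.floordiv_eq_ediv_of_pos (by norm_num)]
  exact pvShiftUpFuel_closed _ low s h le_rfl

theorem pvShiftDownFuel_closed (n : Nat) (high s : Int) (h : s > high)
    (hn : (s - high).toNat ≤ n) :
    pvShiftDownFuel n high s = s - 12 * ((s - high + 11) / 12) := by
  induction n generalizing s with
  | zero => omega
  | succ n ih =>
    rw [pvShiftDownFuel, if_pos h]
    by_cases h2 : s - 12 > high
    · rw [ih (s - 12) h2 (by omega)]
      omega
    · have he : pvShiftDownFuel n high (s - 12) = s - 12 := by
        cases n <;> simp [pvShiftDownFuel, h2]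
      rw [he]; omega

theorem pvShiftDown_closed (high s : Int) (h : s > high) :
    pvShiftDown high s = s - 12 * (PySem.Int.floordiv (s - high + 11) 12) := by
  rw [PySem.Int.floordiv_eq_ediv_of_pos (by norm_num)]
  exact pvShiftDownFuel_closed _ high s h le_rfl

-- ===== VERDICT (by name: the statement is the Claim_ definition above) =====
theorem fit_pitch_to_range_spec : Claim_equal_fit_pitch_to_range := by
  intro pitch abs_range policy _
  unfold Spec_fit_pitch_to_range fit_pitch_to_range fit_pitch_to_range_alt
  match abs_range with
  | none => rfl
  | some (low, high) =>
    simp only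
    by_cases hin : low ≤ pitch ∧ pitch ≤ high
    · rw [if_pos hin, if_pos hin]
    · rw [if_neg hin, if_neg hin]
      by_cases hpol : policy = "octave_shift_to_fit"
      · rw [if_pos hpol, if_pos hpol]
        by_cases hlo : pitch < low
        · simp only [if_pos hlo, pvShiftUp_closed low pitch hlo, pvClamp]
        · have hhi : pitch > high := by omega
          simp only [if_neg hlo, if_pos hhi, pvShiftDown_closed high pitch hhi, pvClamp]
      · rw [if_neg hpol, if_neg hpol]
        simp [pvClamp]
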